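-- pv_equiv track=rewrite | github.com/michalrajkowski/brackeys-game-jam-2025.1 | main.py | is_close_enough
-- ===== SOURCE A (Python) =====
-- def is_close_enough(entity_x, entity_y, block_x, block_y, proximity=4):
--     # Define the entity's bounding box corners
--     entity_corners = [
--         (entity_x, entity_y),  # top-left
--         (entity_x + 7, entity_y),  # top-right
--         (entity_x, entity_y + 7),  # bottom-left
--         (entity_x + 7, entity_y + 7),  # bottom-right
--     ]
--
--     # Define the block's bounding box corners
--     block_corners = [
--         (block_x, block_y),  # top-left
--         (block_x + 7, block_y),  # top-right
--         (block_x, block_y + 7),  # bottom-left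
--         (block_x + 7, block_y + 7),  # bottom-right
--     ]
--
--     # Check if any corner of the entity is within the proximity of the block
--     for ex, ey in entity_corners:
--         for bx, by in block_corners:
--             # Check if the distance between entity corner and block corner is within proximity
--             if abs(ex - bx) <= proximity and abs(ey - by) <= proximity:
--                 return True  # Entity is close enough to the block
--
--     return False  # No proximity found
-- ===== SOURCE B (Python) =====
-- def is_close_enough(entity_x, entity_y, block_x, block_y, proximity=4):
--     # Corner pairs range over all x-combinations times all y-combinations,
--     # so the proximity test separates into two independent axis checks.
--     def axis_close(d):
--         # corner offsets on one axis differ by -7, 0 or +7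
--         return any(abs(d + s) <= proximity for s in (-7, 0, 7))
--     return axis_close(entity_x - block_x) and axis_close(entity_y - block_y)
-- ===== Notes on version B (the rewrite author's own statement) =====
-- stated objective: simpler
-- what changed: Replaced the 16-pair nested corner scan by two independent per-axis checks (each axis tests the difference against offsets -7/0/+7), exploiting that the corner pairs form a full x-by-y product.
import Mathlib
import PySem

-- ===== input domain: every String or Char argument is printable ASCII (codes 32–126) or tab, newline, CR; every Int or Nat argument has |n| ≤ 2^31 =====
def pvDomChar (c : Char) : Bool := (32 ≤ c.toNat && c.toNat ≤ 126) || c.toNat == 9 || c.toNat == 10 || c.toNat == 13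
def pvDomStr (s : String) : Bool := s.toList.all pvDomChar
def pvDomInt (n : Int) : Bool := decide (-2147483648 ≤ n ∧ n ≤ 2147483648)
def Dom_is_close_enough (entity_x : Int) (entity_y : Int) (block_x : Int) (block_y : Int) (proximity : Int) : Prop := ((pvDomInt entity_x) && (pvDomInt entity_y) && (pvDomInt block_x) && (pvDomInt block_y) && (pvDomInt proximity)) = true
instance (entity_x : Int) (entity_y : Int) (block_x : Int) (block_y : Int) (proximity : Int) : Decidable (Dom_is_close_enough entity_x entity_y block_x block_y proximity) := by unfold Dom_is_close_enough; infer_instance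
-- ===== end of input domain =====

-- ===== PORT A =====
-- literal port of A: nested any over the two 4-corner lists (early return = List.any)
def is_close_enough (entity_x : Int) (entity_y : Int) (block_x : Int) (block_y : Int) (proximity : Int) : Bool :=
  let entity_corners : List (Int × Int) :=
    [(entity_x, entity_y), (entity_x + 7, entity_y),
     (entity_x, entity_y + 7), (entity_x + 7, entity_y + 7)]
  let block_corners : List (Int × Int) :=
    [(block_x, block_y), (block_x + 7, block_y),
     (block_x, block_y + 7), (block_x + 7, block_y + 7)]
  entity_corners.any (fun e =>
    block_corners.any (fun b =>
      |e.1 - b.1| ≤ proximity && |e.2 - b.2| ≤ proximity))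

-- ===== PORT B =====
-- B: the test separates per axis; one axis is close iff the difference shifted by -7/0/+7 is within proximity
def pvAxisClose (d proximity : Int) : Bool :=
  ([(-7 : Int), 0, 7]).any (fun s => |d + s| ≤ proximity)

def is_close_enough_alt (entity_x : Int) (entity_y : Int) (block_x : Int) (block_y : Int) (proximity : Int) : Bool :=
  pvAxisClose (entity_x - block_x) proximity && pvAxisClose (entity_y - block_y) proximity

-- ===== PRECONDITION & SPEC =====
def Spec_is_close_enough (entity_x : Int) (entity_y : Int) (block_x : Int) (block_y : Int) (proximity : Int) (out : Bool) : Prop := out = is_close_enough_alt entity_x entity_y block_x block_y proximity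
instance (entity_x : Int) (entity_y : Int) (block_x : Int) (block_y : Int) (proximity : Int) (out : Bool) : Decidable (Spec_is_close_enough entity_x entity_y block_x block_y proximity out) := by unfold Spec_is_close_enough; infer_instance

-- ===== CLAIM (what is proved, stated in full; the proofs are below) =====
def Claim_equal_is_close_enough : Prop := ∀ (entity_x : Int) (entity_y : Int) (block_x : Int) (block_y : Int) (proximity : Int), Dom_is_close_enough entity_x entity_y block_x block_y proximity → Spec_is_close_enough entity_x entity_y block_x block_y proximity (is_close_enough entity_x entity_y block_x block_y proximity)

-- ===== LEMMAS AND PROOFS =====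

-- ===== VERDICT (by name: the statement is the Claim_ definition above) =====
theorem is_close_enough_spec : Claim_equal_is_close_enough := by
  intro ex ey bx by' p _
  unfold Spec_is_close_enough is_close_enough is_close_enough_alt pvAxisClose
  simp only [List.any_cons, List.any_nil, Bool.or_false]
  rw [Bool.eq_iff_iff]
  simp only [Bool.or_eq_true, Bool.and_eq_true, decide_eq_true_eq, abs_le]
  omega
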